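-- pv_equiv track=rewrite | github.com/ofanan/APSR | MaxParal.py | calc_P
-- ===== SOURCE A (Python) =====
-- def calc_P (a, b):
-- 	# Initialize P is a 2D-array of 1. P[a][b] will hold P(a,b)
-- 	P = [x[:] for x in [[0] * (b+1)] * (a+1)]
-- 	for cur_b in range (0, b+1):
-- 		P[0][cur_b] = 1
-- 	for cur_a in range (0, a+1):
-- 		P[cur_a][1] = 1
-- 	for cur_b in range (2, b+1):
-- 		for cur_a in range (1, a+1):
-- 			for j in range (0, cur_a+1):
-- 				P[cur_a][cur_b] += pow (cur_b, j) * P[cur_a-j][cur_b-1]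
-- 	return P
-- ===== SOURCE B (Python) =====
-- def calc_P(a, b):
--     # Column-by-column DP with a running accumulator:
--     # column cb satisfies col[i] = prev[i] + cb*col[i-1], removing A's inner j-sum.
--     cols = [[1] + [0] * a, [1] * (a + 1)]
--     for cur_b in range(2, b + 1):
--         prev = cols[-1]
--         col = [1]
--         for i in range(1, a + 1):
--             col.append(prev[i] + cur_b * col[-1])
--         cols.append(col)
--     return [[col[i] for col in cols] for i in range(a + 1)]
-- ===== Notes on version B (the rewrite author's own statement) =====
-- stated objective: alternative
-- what changed: Replaces the inner j-sum (P[a][b] = sum_j b^j * P[a-j][b-1]) by a column-wise running accumulator col[i] = prev[i] + b*col[i-1] (O(a*b) arithmetic ops vs A's O(a^2*b)), building the table column by column and transposing at the end.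
-- outside the precondition, e.g. on calc_P(0, 0): A raises IndexError, B returns [[1, 1]]; on calc_P(-1, 2): A raises IndexError, B returns []
import Mathlib
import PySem

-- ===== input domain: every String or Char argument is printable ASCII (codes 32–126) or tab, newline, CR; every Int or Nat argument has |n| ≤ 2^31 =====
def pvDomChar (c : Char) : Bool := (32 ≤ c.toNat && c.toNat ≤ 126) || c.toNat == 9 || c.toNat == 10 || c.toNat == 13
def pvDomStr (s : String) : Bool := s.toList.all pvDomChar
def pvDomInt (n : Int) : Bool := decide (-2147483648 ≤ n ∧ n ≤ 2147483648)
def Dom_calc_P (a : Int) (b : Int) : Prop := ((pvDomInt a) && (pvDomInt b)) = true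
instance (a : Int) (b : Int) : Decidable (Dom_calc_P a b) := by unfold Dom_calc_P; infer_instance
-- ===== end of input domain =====

-- B replaces A's inner j-sum per cell (P[a][b] = Σ_j b^j·P[a-j][b-1]) by a column-wise
-- running accumulator col[i] = prev[i] + b·col[i-1], building the table column by column.

-- ===== PORT A =====
-- 2D read/write helpers for A's `P[i][j]` / `P[i][j] = v`: on every executed access of A
-- inside Pre_, the indices are nonnegative and in range, where these are exactly Python.
def pvGet2 (P : List (List Int)) (i j : Int) : Int :=
  PySem.List.pyGetD (PySem.List.pyGetD P i []) j 0
def pvSet2 (P : List (List Int)) (i j : Int) (v : Int) : List (List Int) :=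
  P.modify i.toNat (fun r => r.set j.toNat v)

def calc_P (a : Int) (b : Int) : List (List Int) :=
  let P0 : List (List Int) := List.replicate (a + 1).toNat (List.replicate (b + 1).toNat 0)
  let P1 := (PySem.List.pyRange 0 (b + 1) 1).foldl (fun P cur_b => pvSet2 P 0 cur_b 1) P0
  let P2 := (PySem.List.pyRange 0 (a + 1) 1).foldl (fun P cur_a => pvSet2 P cur_a 1 1) P1
  (PySem.List.pyRange 2 (b + 1) 1).foldl (fun P cur_b =>
    (PySem.List.pyRange 1 (a + 1) 1).foldl (fun P cur_a =>
      (PySem.List.pyRange 0 (cur_a + 1) 1).foldl (fun P j =>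
        pvSet2 P cur_a cur_b
          (pvGet2 P cur_a cur_b + cur_b ^ j.toNat * pvGet2 P (cur_a - j) (cur_b - 1))) P) P) P2

-- ===== PORT B =====
def calc_P_alt (a : Int) (b : Int) : List (List Int) :=
  let cols0 : List (List Int) :=
    [1 :: List.replicate a.toNat 0, List.replicate (a + 1).toNat 1]
  let cols := (PySem.List.pyRange 2 (b + 1) 1).foldl (fun cols cur_b =>
    let prev := PySem.List.pyGetD cols (-1) []
    let col := (PySem.List.pyRange 1 (a + 1) 1).foldl (fun col i =>
      col ++ [PySem.List.pyGetD prev i 0 + cur_b * PySem.List.pyGetD col (-1) 0]) [1]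
    cols ++ [col]) cols0
  (PySem.List.pyRange 0 (a + 1) 1).map (fun i =>
    cols.map (fun col => PySem.List.pyGetD col i 0))

-- ===== PRECONDITION & SPEC =====
-- Pre_ excludes exactly the inputs on which A raises IndexError (a ≥ 0 with b ≤ 0, or
-- a < 0 with b ≥ 0: the init loops index a row/column the zero table does not have);
-- on a < 0 ∧ b < 0 both programs return [].
def Pre_calc_P (a : Int) (b : Int) : Prop := (0 ≤ a ∧ 1 ≤ b) ∨ (a < 0 ∧ b < 0)
instance (a : Int) (b : Int) : Decidable (Pre_calc_P a b) := by unfold Pre_calc_P; infer_instance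
def pvWitness_calc_P : Int × Int := (3, 4)

def Spec_calc_P (a : Int) (b : Int) (out : List (List Int)) : Prop := out = calc_P_alt a b
instance (a : Int) (b : Int) (out : List (List Int)) : Decidable (Spec_calc_P a b out) := by unfold Spec_calc_P; infer_instance

-- ===== CLAIM (what is proved, stated in full; the proofs are below) =====
def Claim_equal_calc_P : Prop := ∀ (a : Int) (b : Int), Dom_calc_P a b → Pre_calc_P a b → Spec_calc_P a b (calc_P a b)

-- ===== LEMMAS AND PROOFS =====
def pvMat (aN bN : Nat) (f : Nat → Nat → Int) : List (List Int) :=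
  (List.range (aN + 1)).map (fun i => (List.range (bN + 1)).map (fun j => f i j))
def pvE : Nat → Nat → Int
  | _, 0 => 1
  | 0, _ + 1 => 1
  | i + 1, k + 1 => pvE (i + 1) k + ((k : Int) + 2) * pvE i (k + 1)
termination_by i k => (i, k)
def pvF (i j : Nat) : Int := if j = 0 then (if i = 0 then 1 else 0) else pvE i (j - 1)
def pvFout (m i j : Nat) : Int :=
  if j = 0 then (if i = 0 then 1 else 0)
  else if j < m then pvE i (j - 1) else (if i = 0 then 1 else 0)
def pvFmid (m r i j : Nat) : Int :=
  if j = m ∧ 1 ≤ i ∧ i < r then pvE i (m - 1) else pvFout m i j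


lemma pvMat_congr {aN bN : Nat} {f g : Nat → Nat → Int}
    (h : ∀ i j, i ≤ aN → j ≤ bN → f i j = g i j) : pvMat aN bN f = pvMat aN bN g := by
  unfold pvMat
  refine List.map_congr_left (fun i hi => ?_)
  refine List.map_congr_left (fun j hj => ?_)
  have h1 := List.mem_range.mp hi
  have h2 := List.mem_range.mp hj
  exact h i j (by omega) (by omega)

lemma pvGet2_mat {aN bN : Nat} {f : Nat → Nat → Int} {i j : Int}
    (hi0 : 0 ≤ i) (hi : i ≤ (aN : Int)) (hj0 : 0 ≤ j) (hj : j ≤ (bN : Int)) :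
    pvGet2 (pvMat aN bN f) i j = f i.toNat j.toNat := by
  unfold pvGet2 pvMat
  rw [PySem.List.pyGetD_eq_getElem _ _ hi0 (by simp; omega)]
  simp only [List.getElem_map, List.getElem_range]
  rw [PySem.List.pyGetD_eq_getElem _ _ hj0 (by simp; omega)]
  simp

lemma pvSet2_mat {aN bN : Nat} {f : Nat → Nat → Int} {i j : Int} {v : Int}
    (hi0 : 0 ≤ i) (hi : i ≤ (aN : Int)) (hj0 : 0 ≤ j) (hj : j ≤ (bN : Int)) :
    pvSet2 (pvMat aN bN f) i j v
      = pvMat aN bN (fun i' j' => if i' = i.toNat ∧ j' = j.toNat then v else f i' j') := by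
  unfold pvSet2 pvMat
  apply List.ext_getElem
  · simp
  intro k hk hk'
  simp only [List.getElem_modify, List.getElem_map, List.getElem_range]
  simp only [List.length_modify, List.length_map, List.length_range] at hk
  by_cases hik : i.toNat = k
  · simp only [hik, if_pos rfl]
    apply List.ext_getElem
    · simp
    intro l hl hl'
    by_cases hjl : j.toNat = l
    · simp [List.getElem_set, hjl]
    · have hne : ¬(True ∧ l = j.toNat) := fun h => hjl h.2.symm
      simp [List.getElem_set, hjl, hne]
      exact fun h => absurd h.symm hjl
  · simp only [if_neg hik]
    apply List.map_congr_left (fun l hl => ?_)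
    have : ¬(k = i.toNat ∧ l = j.toNat) := fun h => hik h.1.symm
    simp [this]


lemma pvE_zero (i : Nat) : pvE i 0 = 1 := by cases i <;> simp [pvE]
lemma pvE_zero_row (k : Nat) : pvE 0 k = 1 := by cases k <;> simp [pvE]

lemma pvE_sum (k i : Nat) :
    ((List.range (i + 1)).map (fun j => ((k : Int) + 2) ^ j * pvE (i - j) k)).sum
      = pvE i (k + 1) := by
  induction i with
  | zero => simp [pvE_zero_row, pvE_zero]
  | succ i ih =>
    rw [List.range_succ_eq_map]
    simp only [List.map_cons, List.map_map, List.sum_cons, pow_zero, one_mul, Nat.sub_zero]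
    have comp : ((fun j => ((k : Int) + 2) ^ j * pvE (i + 1 - j) k) ∘ (fun j => j + 1))
        = fun j => ((k : Int) + 2) * (((k : Int) + 2) ^ j * pvE (i - j) k) := by
      funext j
      simp only [Function.comp]
      have : i + 1 - (j + 1) = i - j := by omega
      rw [this, pow_succ]
      ring
    rw [comp]
    have : (List.map (fun j => ((k : Int) + 2) * (((k : Int) + 2) ^ j * pvE (i - j) k)) (List.range (i + 1))).sum
        = ((k : Int) + 2) * (List.map (fun j => ((k : Int) + 2) ^ j * pvE (i - j) k) (List.range (i + 1))).sum := by
      rw [List.sum_map_mul_left]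
    rw [this, ih, pvE]


lemma pvA_init (aN bN : Nat) :
    List.replicate (aN + 1) (List.replicate (bN + 1) (0:Int)) = pvMat aN bN (fun _ _ => 0) := by
  simp [pvMat, List.map_const']

lemma pvA_loop1 (aN bN : Nat) (m : Nat) (hm : m ≤ bN + 1) :
    ((PySem.List.pyRange 0 (m : Int) 1).foldl (fun P cur_b => pvSet2 P 0 cur_b 1)
      (pvMat aN bN (fun _ _ => 0)))
    = pvMat aN bN (fun i j => if i = 0 ∧ j < m then 1 else 0) := by
  induction m with
  | zero =>
    rw [show ((0:Nat):Int) = 0 by norm_num, PySem.List.pyRange_one_eq_nil le_rfl]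
    simp only [List.foldl_nil]
    exact pvMat_congr (by intro i j _ _; simp)
  | succ m ih =>
    rw [show (((m+1:Nat)):Int) = (m:Int) + 1 by push_cast; ring,
        PySem.List.pyRange_one_succ_right (by positivity), List.foldl_append, List.foldl_cons,
        List.foldl_nil, ih (by omega),
        pvSet2_mat (by norm_num) (by norm_num) (by positivity) (by exact_mod_cast (by omega : m ≤ bN))]
    apply pvMat_congr
    intro i j hi hj
    simp only [Int.toNat_zero, Int.toNat_natCast]
    split_ifs <;> omega


lemma pvA_loop2 (aN bN : Nat) (hb : 1 ≤ bN) (m : Nat) (hm : m ≤ aN + 1) :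
    ((PySem.List.pyRange 0 (m : Int) 1).foldl (fun P cur_a => pvSet2 P cur_a 1 1)
      (pvMat aN bN (fun i j => if i = 0 ∧ j < bN + 1 then 1 else 0)))
    = pvMat aN bN (fun i j => if (j = 1 ∧ i < m) ∨ i = 0 then 1 else 0) := by
  induction m with
  | zero =>
    rw [show ((0:Nat):Int) = 0 by norm_num, PySem.List.pyRange_one_eq_nil le_rfl]
    simp only [List.foldl_nil]
    apply pvMat_congr; intro i j hi hj
    by_cases h : i = 0 <;> simp [h] <;> omega
  | succ m ih =>
    rw [show (((m+1:Nat)):Int) = (m:Int) + 1 by push_cast; ring,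
        PySem.List.pyRange_one_succ_right (by positivity), List.foldl_append, List.foldl_cons,
        List.foldl_nil, ih (by omega),
        pvSet2_mat (by positivity) (by exact_mod_cast (by omega : m ≤ aN)) (by norm_num)
          (by exact_mod_cast hb)]
    apply pvMat_congr
    intro i j hi hj
    simp only [Int.toNat_natCast, Int.toNat_one]
    split_ifs <;> omega

lemma pvA_jloop (aN bN : Nat) (f : Nat → Nat → Int) (ca cb : Int)
    (hca0 : 0 ≤ ca) (hca : ca ≤ (aN : Int)) (hcb1 : 1 ≤ cb) (hcb : cb ≤ (bN : Int))
    (js : List Int) (hjs : ∀ j ∈ js, 0 ≤ j ∧ j ≤ ca) :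
    js.foldl (fun P j => pvSet2 P ca cb
        (pvGet2 P ca cb + cb ^ j.toNat * pvGet2 P (ca - j) (cb - 1))) (pvMat aN bN f)
    = pvMat aN bN (fun i' j' => if i' = ca.toNat ∧ j' = cb.toNat
        then f i' j' + (js.map (fun j => cb ^ j.toNat * f (ca - j).toNat (cb - 1).toNat)).sum
        else f i' j') := by
  induction js generalizing f with
  | nil =>
    simp only [List.foldl_nil, List.map_nil, List.sum_nil, add_zero]
    exact (pvMat_congr (by intro i j _ _; split_ifs <;> rfl)).symm
  | cons j0 js ih =>
    have hj0 := hjs j0 (by simp)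
    have hsub0 : (0:Int) ≤ ca - j0 := by omega
    have hsub : ca - j0 ≤ (aN : Int) := by omega
    have hc10 : (0:Int) ≤ cb - 1 := by omega
    have hc1 : cb - 1 ≤ (bN : Int) := by omega
    have hcolne : (cb - 1).toNat ≠ cb.toNat := by omega
    rw [List.foldl_cons,
        pvGet2_mat hca0 hca (by omega) hcb,
        pvGet2_mat hsub0 hsub hc10 hc1,
        pvSet2_mat hca0 hca (by omega) hcb,
        ih _ (fun j hj => hjs j (by simp [hj]))]
    apply pvMat_congr
    intro i j hi hj
    by_cases hij : i = ca.toNat ∧ j = cb.toNat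
    · simp only [hij, and_self, if_pos, if_true, List.map_cons, List.sum_cons]
      have hmap : (js.map (fun j => cb ^ j.toNat *
            (if (ca - j).toNat = ca.toNat ∧ (cb - 1).toNat = cb.toNat then
              f ca.toNat cb.toNat + cb ^ j0.toNat * f (ca - j0).toNat (cb - 1).toNat
            else f (ca - j).toNat (cb - 1).toNat)))
          = js.map (fun j => cb ^ j.toNat * f (ca - j).toNat (cb - 1).toNat) := by
        apply List.map_congr_left
        intro x hx
        rw [if_neg (fun h => hcolne h.2)]
      rw [hmap]
      ring
    · rw [if_neg hij, if_neg hij, if_neg hij]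

lemma pvA_rowloop (aN bN m : Nat) (hm2 : 2 ≤ m) (hmb : m ≤ bN) (r : Nat) (hr1 : 1 ≤ r)
    (hr : r ≤ aN + 1) :
    ((PySem.List.pyRange 1 (r : Int) 1).foldl (fun P cur_a =>
        (PySem.List.pyRange 0 (cur_a + 1) 1).foldl (fun P j => pvSet2 P cur_a (m : Int)
          (pvGet2 P cur_a (m : Int) + (m : Int) ^ j.toNat *
            pvGet2 P (cur_a - j) ((m : Int) - 1))) P)
      (pvMat aN bN (pvFout m)))
    = pvMat aN bN (pvFmid m r) := by
  induction r, hr1 using Nat.le_induction with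
  | base =>
    rw [show ((1:Nat):Int) = 1 by norm_num, PySem.List.pyRange_one_eq_nil le_rfl]
    simp only [List.foldl_nil]
    apply pvMat_congr; intro i j hi hj
    unfold pvFmid
    rw [if_neg (by omega)]
  | succ r hr1 ih =>
    rw [show (((r+1:Nat)):Int) = (r:Int) + 1 by push_cast; ring,
        PySem.List.pyRange_one_succ_right (by exact_mod_cast hr1), List.foldl_append,
        List.foldl_cons, List.foldl_nil, ih (by omega),
        pvA_jloop aN bN (pvFmid m r) (r:Int) (m:Int) (by positivity)
          (by exact_mod_cast (by omega : r ≤ aN)) (by exact_mod_cast (by omega : 1 ≤ m))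
          (by exact_mod_cast hmb) _
          (fun j hj => by
            have := (PySem.List.mem_pyRange_one).mp hj
            omega)]
    -- compute the inner sum: it is exactly pvE r (m-1)
    have hsum : ((PySem.List.pyRange 0 ((r:Int) + 1) 1).map (fun j =>
          (m : Int) ^ j.toNat * pvFmid m r ((r:Int) - j).toNat ((m : Int) - 1).toNat)).sum
        = pvE r (m - 1) := by
      rw [show ((r:Int) + 1) = (((r+1:Nat)):Int) by push_cast; ring,
          PySem.List.pyRange_zero_natCast, List.map_map]
      have hcongr : ∀ jN ∈ List.range (r + 1),
          ((fun j => (m : Int) ^ j.toNat * pvFmid m r ((r:Int) - j).toNat ((m : Int) - 1).toNat)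
            ∘ (fun k : Nat => (k : Int))) jN
          = (fun jN => ((((m-2:Nat)) : Int) + 2) ^ jN * pvE (r - jN) (m - 2)) jN := by
        intro jN hjN
        have hjr : jN ≤ r := by have := List.mem_range.mp hjN; omega
        simp only [Function.comp, Int.toNat_natCast]
        have h1 : ((r:Int) - (jN:Int)).toNat = r - jN := by omega
        have h2 : ((m:Int) - 1).toNat = m - 1 := by omega
        have h3 : ((((m-2:Nat)) : Int) + 2) = (m : Int) := by omega
        rw [h1, h2, h3]
        congr 1
        unfold pvFmid pvFout
        rw [if_neg (by omega), if_neg (by omega), if_pos (by omega)]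
        congr 1 <;> omega
      rw [List.map_congr_left hcongr, pvE_sum]
      congr 1 <;> omega
    rw [hsum]
    apply pvMat_congr
    intro i j hi hj
    simp only [Int.toNat_natCast]
    by_cases hij : i = r ∧ j = m
    · rw [if_pos hij, hij.1, hij.2]
      have hL : pvFmid m r r m = 0 := by
        unfold pvFmid pvFout
        rw [if_neg (by omega), if_neg (by omega), if_neg (by omega), if_neg (by omega)]
      have hR : pvFmid m (r + 1) r m = pvE r (m - 1) := by
        unfold pvFmid
        rw [if_pos (by omega)]
      rw [hL, hR, zero_add]
    · rw [if_neg hij]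
      unfold pvFmid
      by_cases hc : j = m ∧ 1 ≤ i ∧ i < r
      · rw [if_pos hc, if_pos (by omega)]
      · rw [if_neg hc, if_neg (by omega)]

lemma pvA_outer (aN bN : Nat) (m : Nat) (hm2 : 2 ≤ m) (hm : m ≤ bN + 1) :
    ((PySem.List.pyRange 2 (m : Int) 1).foldl (fun P cur_b =>
        (PySem.List.pyRange 1 (((aN + 1 : Nat)) : Int) 1).foldl (fun P cur_a =>
          (PySem.List.pyRange 0 (cur_a + 1) 1).foldl (fun P j => pvSet2 P cur_a cur_b
            (pvGet2 P cur_a cur_b + cur_b ^ j.toNat *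
              pvGet2 P (cur_a - j) (cur_b - 1))) P) P)
      (pvMat aN bN (pvFout 2)))
    = pvMat aN bN (pvFout m) := by
  induction m, hm2 using Nat.le_induction with
  | base =>
    rw [show ((2:Nat):Int) = 2 by norm_num, PySem.List.pyRange_one_eq_nil le_rfl]
    simp only [List.foldl_nil]
  | succ m hm2 ih =>
    rw [show (((m+1:Nat)):Int) = (m:Int) + 1 by push_cast; ring,
        PySem.List.pyRange_one_succ_right (by exact_mod_cast hm2), List.foldl_append,
        List.foldl_cons, List.foldl_nil, ih (by omega),
        pvA_rowloop aN bN m hm2 (by omega) (aN + 1) (by omega) le_rfl]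
    apply pvMat_congr
    intro i j hi hj
    unfold pvFmid pvFout
    split_ifs <;> first | rfl | omega | simp_all [pvE_zero_row] | (exfalso; simp_all; omega)

lemma pvA_final (a b : Int) (ha : 0 ≤ a) (hb : 1 ≤ b) :
    calc_P a b = pvMat a.toNat b.toNat pvF := by
  have hbN : 1 ≤ b.toNat := by omega
  simp only [calc_P]
  rw [show a + 1 = ((a.toNat + 1 : Nat) : Int) by omega,
      show b + 1 = ((b.toNat + 1 : Nat) : Int) by omega,
      Int.toNat_natCast, Int.toNat_natCast,
      pvA_init a.toNat b.toNat,
      pvA_loop1 a.toNat b.toNat (b.toNat + 1) le_rfl,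
      pvA_loop2 a.toNat b.toNat hbN (a.toNat + 1) le_rfl,
      show pvMat a.toNat b.toNat (fun i j => if (j = 1 ∧ i < a.toNat + 1) ∨ i = 0 then 1 else 0)
          = pvMat a.toNat b.toNat (pvFout 2) from
        pvMat_congr (by
          intro i j hi hj
          unfold pvFout
          split_ifs <;> first | rfl | omega | simp_all [pvE_zero_row, pvE_zero] | (exfalso; omega)),
      pvA_outer a.toNat b.toNat (b.toNat + 1) (by omega) le_rfl]
  apply pvMat_congr
  intro i j hi hj
  unfold pvFout pvF
  split_ifs <;> first | rfl | omega


def pvCol (aN j : Nat) : List Int := (List.range (aN + 1)).map (fun i => pvF i j)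

lemma pvIdx (g : Nat → Int) (n : Nat) (i : Int) (h0 : 0 ≤ i) (h : i < (n : Int)) :
    PySem.List.pyGetD ((List.range n).map g) i 0 = g i.toNat := by
  rw [PySem.List.pyGetD_eq_getElem _ _ h0 (by simp; omega)]
  simp

lemma pvLastIdx {α : Type} (xs : List α) (x : α) (d : α) :
    PySem.List.pyGetD (xs ++ [x]) (-1) d = x := by
  simp [PySem.List.pyGetD, PySem.List.pyGet?_neg_one_append_singleton]

lemma pvE_step (m r : Nat) (hm2 : 2 ≤ m) (hr1 : 1 ≤ r) :
    pvE r (m - 1) = pvE r (m - 2) + (m : Int) * pvE (r - 1) (m - 1) := by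
  obtain ⟨i, rfl⟩ : ∃ i, r = i + 1 := ⟨r - 1, by omega⟩
  obtain ⟨k, rfl⟩ : ∃ k, m = k + 2 := ⟨m - 2, by omega⟩
  have h1 : k + 2 - 1 = k + 1 := by omega
  have h2 : k + 2 - 2 = k := by omega
  have h3 : i + 1 - 1 = i := by omega
  rw [h1, h2, h3, pvE]
  push_cast; ring

lemma pvB_colloop (aN m : Nat) (hm2 : 2 ≤ m) (r : Nat) (hr1 : 1 ≤ r) (hr : r ≤ aN + 1) :
    ((PySem.List.pyRange 1 (r : Int) 1).foldl (fun col i =>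
        col ++ [PySem.List.pyGetD (pvCol aN (m - 1)) i 0 +
          (m : Int) * PySem.List.pyGetD col (-1) 0]) [1])
    = (List.range r).map (fun i => pvE i (m - 1)) := by
  induction r, hr1 using Nat.le_induction with
  | base =>
    rw [show ((1:Nat):Int) = 1 by norm_num, PySem.List.pyRange_one_eq_nil le_rfl]
    simp [pvE_zero_row]
  | succ r hr1 ih =>
    rw [show (((r+1:Nat)):Int) = (r:Int) + 1 by push_cast; ring,
        PySem.List.pyRange_one_succ_right (by exact_mod_cast hr1), List.foldl_append,
        List.foldl_cons, List.foldl_nil, ih (by omega)]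
    obtain ⟨k, hk⟩ : ∃ k, r = k + 1 := ⟨r - 1, by omega⟩
    have hlast : PySem.List.pyGetD ((List.range r).map (fun i => pvE i (m - 1))) (-1) 0
        = pvE (r - 1) (m - 1) := by
      rw [hk, List.range_succ, List.map_append, List.map_cons, List.map_nil, pvLastIdx]
      have : k + 1 - 1 = k := by omega
      rw [this]
    have hread : PySem.List.pyGetD (pvCol aN (m - 1)) ((r : Nat) : Int) 0 = pvE r (m - 2) := by
      unfold pvCol
      rw [pvIdx _ _ _ (by positivity) (by exact_mod_cast (by omega : r < aN + 1)),
          Int.toNat_natCast]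
      unfold pvF
      rw [if_neg (by omega)]
      congr 1 <;> omega
    have hval : pvE r (m - 2) + (m : Int) * pvE (r - 1) (m - 1) = pvE r (m - 1) :=
      (pvE_step m r hm2 (by omega)).symm
    rw [hlast, hread, hval,
        show List.range (r + 1) = List.range r ++ [r] from List.range_succ,
        List.map_append, List.map_cons, List.map_nil]

lemma pvB_cols (aN bN : Nat) (hb : 1 ≤ bN) (m : Nat) (hm2 : 2 ≤ m) (hm : m ≤ bN + 1) :
    ((PySem.List.pyRange 2 (m : Int) 1).foldl (fun cols cur_b =>
        cols ++ [(PySem.List.pyRange 1 (((aN + 1 : Nat)) : Int) 1).foldl (fun col i =>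
          col ++ [PySem.List.pyGetD (PySem.List.pyGetD cols (-1) []) i 0 +
            cur_b * PySem.List.pyGetD col (-1) 0]) [1]])
      [1 :: List.replicate aN 0, List.replicate (aN + 1) 1])
    = (List.range m).map (pvCol aN) := by
  induction m, hm2 using Nat.le_induction with
  | base =>
    rw [show ((2:Nat):Int) = 2 by norm_num, PySem.List.pyRange_one_eq_nil le_rfl]
    simp only [List.foldl_nil]
    have h0 : pvCol aN 0 = 1 :: List.replicate aN 0 := by
      unfold pvCol
      rw [List.range_succ_eq_map, List.map_cons, List.map_map]
      have h00 : pvF 0 0 = 1 := by simp [pvF]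
      have hz : ∀ x ∈ List.range aN, ((fun i => pvF i 0) ∘ Nat.succ) x = (fun _ => (0:Int)) x := by
        intro x hx
        simp [pvF]
      rw [h00, List.map_congr_left hz, List.map_const', List.length_range]
    have h1 : pvCol aN 1 = List.replicate (aN + 1) 1 := by
      simp [pvCol, pvF, pvE_zero, List.map_const']
    rw [show List.range 2 = [0, 1] by rfl]
    simp [h0, h1]
  | succ m hm2 ih =>
    rw [show (((m+1:Nat)):Int) = (m:Int) + 1 by push_cast; ring,
        PySem.List.pyRange_one_succ_right (by exact_mod_cast hm2), List.foldl_append,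
        List.foldl_cons, List.foldl_nil, ih (by omega)]
    obtain ⟨k, hk⟩ : ∃ k, m = k + 1 := ⟨m - 1, by omega⟩
    have hprev : PySem.List.pyGetD ((List.range m).map (pvCol aN)) (-1) []
        = pvCol aN (m - 1) := by
      rw [hk, List.range_succ, List.map_append, List.map_cons, List.map_nil, pvLastIdx]
      have : k + 1 - 1 = k := by omega
      rw [this]
    rw [hprev, pvB_colloop aN m hm2 (aN + 1) (by omega) le_rfl,
        show List.range (m + 1) = List.range m ++ [m] from List.range_succ,
        List.map_append, List.map_cons, List.map_nil]
    congr 2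
    unfold pvCol
    apply List.map_congr_left
    intro i hi
    unfold pvF
    rw [if_neg (by omega)]

lemma pvB_final (a b : Int) (ha : 0 ≤ a) (hb : 1 ≤ b) :
    calc_P_alt a b = pvMat a.toNat b.toNat pvF := by
  simp only [calc_P_alt]
  rw [show a + 1 = ((a.toNat + 1 : Nat) : Int) by omega,
      show b + 1 = ((b.toNat + 1 : Nat) : Int) by omega,
      Int.toNat_natCast,
      pvB_cols a.toNat b.toNat (by omega) (b.toNat + 1) (by omega) le_rfl,
      PySem.List.pyRange_zero_natCast, List.map_map]
  unfold pvMat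
  apply List.map_congr_left
  intro i hi
  have hin : i < a.toNat + 1 := List.mem_range.mp hi
  simp only [Function.comp, List.map_map]
  apply List.map_congr_left
  intro j hj
  simp only [Function.comp]
  unfold pvCol
  rw [pvIdx _ _ _ (by positivity) (by exact_mod_cast hin), Int.toNat_natCast]

lemma pv_neg (a b : Int) (ha : a < 0) (hb : b < 0) : calc_P a b = [] ∧ calc_P_alt a b = [] := by
  constructor
  · simp only [calc_P]
    rw [PySem.List.pyRange_one_eq_nil (by omega : b + 1 ≤ 0),
        PySem.List.pyRange_one_eq_nil (by omega : a + 1 ≤ 0),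
        PySem.List.pyRange_one_eq_nil (by omega : b + 1 ≤ 2)]
    simp only [List.foldl_nil]
    rw [show (a + 1).toNat = 0 by omega]
    rfl
  · simp only [calc_P_alt]
    rw [PySem.List.pyRange_one_eq_nil (by omega : a + 1 ≤ 0)]
    rfl

theorem pv_main (a b : Int) (h : (0 ≤ a ∧ 1 ≤ b) ∨ (a < 0 ∧ b < 0)) :
    calc_P a b = calc_P_alt a b := by
  rcases h with ⟨ha, hb⟩ | ⟨ha, hb⟩
  · rw [pvA_final a b ha hb, pvB_final a b ha hb]
  · rw [(pv_neg a b ha hb).1, (pv_neg a b ha hb).2]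

-- ===== VERDICT (by name: the statement is the Claim_ definition above) =====
theorem calc_P_spec : Claim_equal_calc_P := by
  intro a b _ hpre
  exact pv_main a b hpre
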